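-- pv_equiv track=rewrite | github.com/andressakaren/ATV_TDS | DOT/lista02/q16.py | transformar_lista
-- ===== SOURCE A (Python) =====
-- def transformar_lista(x):
--     y = []
--     for i in range(len(x)):
--         if i % 2 == 0:
--             y.append(x[i] // 2)
--         else:
--             y.append(x[i] * 3)
--     return y
-- ===== SOURCE B (Python) =====
-- def transformar_lista(x):
--     y = [0] * len(x)
--     y[0::2] = [e // 2 for e in x[0::2]]
--     y[1::2] = [e * 3 for e in x[1::2]]
--     return y
-- ===== Notes on version B (the rewrite author's own statement) =====
-- stated objective: alternative
-- what changed: Replaces the single index loop with a per-element parity branch by two branch-free strided-slice passes (halve x[0::2], triple x[1::2]) written into a pre-allocated output.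
import Mathlib
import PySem

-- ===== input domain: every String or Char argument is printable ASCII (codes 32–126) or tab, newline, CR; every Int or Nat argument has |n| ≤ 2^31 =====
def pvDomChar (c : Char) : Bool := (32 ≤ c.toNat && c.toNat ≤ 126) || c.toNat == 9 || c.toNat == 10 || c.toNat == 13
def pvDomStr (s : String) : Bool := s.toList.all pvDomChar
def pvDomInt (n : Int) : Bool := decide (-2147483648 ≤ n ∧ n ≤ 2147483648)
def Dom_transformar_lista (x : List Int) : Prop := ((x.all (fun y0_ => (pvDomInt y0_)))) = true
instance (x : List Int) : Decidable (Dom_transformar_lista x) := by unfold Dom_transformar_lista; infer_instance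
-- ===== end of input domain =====

-- B replaces the index loop with its per-element parity branch by two branch-free strided-slice passes (halve the even-index slice, triple the odd-index slice) interleaved back together.


-- ===== PORT A =====
-- for i in range(len(x)): if i % 2 == 0: y.append(x[i] // 2) else: y.append(x[i] * 3)
-- (x[i] is always in range here, so pyGetD is exact)
def transformar_lista (x : List Int) : List Int :=
  (PySem.List.pyRange 0 (x.length : Int) 1).foldl
    (fun y i =>
      if PySem.Int.mod i 2 = 0 then
        y ++ [PySem.Int.floordiv (PySem.List.pyGetD x i 0) 2]
      else
        y ++ [PySem.List.pyGetD x i 0 * 3]) []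

-- ===== PORT B =====
-- x[a::2] ported by hand (exact on lists): every second element starting at the head
def pvEvery2 : List Int → List Int
  | [] => []
  | a :: r => a :: pvEvery2 r.tail
termination_by l => l.length
decreasing_by simp

-- slice reassembly y[0::2] = es; y[1::2] = os (es one longer or equal): alternate, swapping roles
def pvInterleave : List Int → List Int → List Int
  | [], _ => []
  | a :: e, o => a :: pvInterleave o e
termination_by e o => e.length + o.length
decreasing_by simp; omega

def transformar_lista_alt (x : List Int) : List Int :=
  pvInterleave ((pvEvery2 x).map (fun e => PySem.Int.floordiv e 2))
               ((pvEvery2 x.tail).map (fun e => e * 3))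

-- ===== PRECONDITION & SPEC =====
def Spec_transformar_lista (x : List Int) (out : List Int) : Prop := out = transformar_lista_alt x
instance (x : List Int) (out : List Int) : Decidable (Spec_transformar_lista x out) := by unfold Spec_transformar_lista; infer_instance

-- ===== CLAIM (what is proved, stated in full; the proofs are below) =====
def Claim_equal_transformar_lista : Prop := ∀ (x : List Int), Dom_transformar_lista x → Spec_transformar_lista x (transformar_lista x)

-- ===== LEMMAS AND PROOFS =====

theorem pvEvery2_nil : pvEvery2 [] = [] := by rw [pvEvery2]

theorem pvEvery2_cons (a : Int) (r : List Int) :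
    pvEvery2 (a :: r) = a :: pvEvery2 r.tail := by rw [pvEvery2]

theorem pvInterleave_nil (o : List Int) : pvInterleave [] o = [] := by rw [pvInterleave]

theorem pvInterleave_cons (a : Int) (e o : List Int) :
    pvInterleave (a :: e) o = a :: pvInterleave o e := by rw [pvInterleave]

-- parity-flagged map: what both programs compute
def pvGo : List Int → Bool → List Int
  | [], _ => []
  | a :: r, b => (if b then PySem.Int.floordiv a 2 else a * 3) :: pvGo r (!b)

theorem pvAlt_eq_go (x : List Int) (b : Bool) :
    pvInterleave ((pvEvery2 x).map (fun e => if b then PySem.Int.floordiv e 2 else e * 3))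
                 ((pvEvery2 x.tail).map (fun e => if b then e * 3 else PySem.Int.floordiv e 2))
      = pvGo x b := by
  induction x generalizing b with
  | nil => simp [pvEvery2_nil, pvInterleave_nil, pvGo]
  | cons a r ih =>
    have h := ih (!b)
    cases b <;> simpa [pvEvery2_cons, pvInterleave_cons, pvGo] using h

theorem pvEnum_eq_go (x : List Int) (k : Int) :
    (PySem.List.enumerate x k).map
      (fun p => if PySem.Int.mod p.1 2 = 0 then PySem.Int.floordiv p.2 2 else p.2 * 3)
      = pvGo x (decide (PySem.Int.mod k 2 = 0)) := by
  induction x generalizing k with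
  | nil => simp [PySem.List.enumerate_nil, pvGo]
  | cons a r ih =>
    have hpar : (decide (PySem.Int.mod (k + 1) 2 = 0)) = !(decide (PySem.Int.mod k 2 = 0)) := by
      have h2 : (0:Int) < 2 := by omega
      rw [PySem.Int.mod_eq_emod_of_pos h2, PySem.Int.mod_eq_emod_of_pos h2]
      by_cases h : k % 2 = 0
      · simp [h]; omega
      · simp [h]; omega
    rw [PySem.List.enumerate_cons, List.map_cons, ih (k + 1), hpar, pvGo]
    by_cases h : PySem.Int.mod k 2 = 0 <;> simp [h]

theorem pvA_eq_go (x : List Int) : transformar_lista x = pvGo x true := by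
  unfold transformar_lista
  have hbody : (fun (y : List Int) (i : Int) =>
      if PySem.Int.mod i 2 = 0 then
        y ++ [PySem.Int.floordiv (PySem.List.pyGetD x i 0) 2]
      else
        y ++ [PySem.List.pyGetD x i 0 * 3]) =
      (fun (y : List Int) (i : Int) =>
        y ++ [if PySem.Int.mod i 2 = 0 then
                PySem.Int.floordiv (PySem.List.pyGetD x i 0) 2
              else PySem.List.pyGetD x i 0 * 3]) := by
    funext y i; split <;> rfl
  rw [hbody, PySem.List.foldl_append_singleton_eq_map, List.nil_append]
  have e := pvEnum_eq_go x 0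
  rw [PySem.List.enumerate_eq_map_pyRange (d := (0 : Int)), List.map_map] at e
  simpa using e

-- ===== VERDICT (by name: the statement is the Claim_ definition above) =====
theorem transformar_lista_spec : Claim_equal_transformar_lista := by
  intro x _
  show transformar_lista x = transformar_lista_alt x
  rw [pvA_eq_go]
  have h := pvAlt_eq_go x true
  simpa [transformar_lista_alt] using h.symm
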